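-- pv_equiv track=rewrite | github.com/lekhuynh/Project-VietChoice-Official | be/app/services/admin_service.py | _make_safe_key
-- ===== SOURCE A (Python) =====
-- def _make_safe_key(category_name: str) -> str:
--     """Chuyển category name thành key an toàn cho JSON"""
--     if not category_name:
--         return "unknown"
--
--     # Chuyển thành lowercase, thay thế khoảng trắng và ký tự đặc biệt
--     safe_key = category_name.lower().strip()
--     safe_key = safe_key.replace(' ', '_')
--     safe_key = safe_key.replace('-', '_')
--     safe_key = safe_key.replace('&', 'and')
--     safe_key = safe_key.replace('/', '_')
--     safe_key = safe_key.replace('\\', '_')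
--     safe_key = ''.join(c for c in safe_key if c.isalnum() or c == '_')
--
--     # Đảm bảo không rỗng
--     if not safe_key:
--         return "unknown"
--
--     return safe_key
-- ===== SOURCE B (Python) =====
-- def _make_safe_key(category_name: str) -> str:
--     """Normalize a category name into a safe JSON key in a single character pass."""
--     if not category_name:
--         return "unknown"
--     pieces = []
--     for c in category_name.lower().strip():
--         if c == '&':
--             pieces.append('and')
--         elif c in ' -/\\':
--             pieces.append('_')
--         elif c.isalnum() or c == '_':
--             pieces.append(c)
--     key = ''.join(pieces)
--     return key if key else "unknown"
-- ===== Notes on version B (the rewrite author's own statement) =====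
-- stated objective: simpler
-- what changed: Replaces A's five sequential full-string .replace passes plus a separate filtering join (7 scans) by one single pass that classifies each character ('&'->'and', separator->'_', alnum/underscore kept, rest dropped) and joins once.
import Mathlib
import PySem

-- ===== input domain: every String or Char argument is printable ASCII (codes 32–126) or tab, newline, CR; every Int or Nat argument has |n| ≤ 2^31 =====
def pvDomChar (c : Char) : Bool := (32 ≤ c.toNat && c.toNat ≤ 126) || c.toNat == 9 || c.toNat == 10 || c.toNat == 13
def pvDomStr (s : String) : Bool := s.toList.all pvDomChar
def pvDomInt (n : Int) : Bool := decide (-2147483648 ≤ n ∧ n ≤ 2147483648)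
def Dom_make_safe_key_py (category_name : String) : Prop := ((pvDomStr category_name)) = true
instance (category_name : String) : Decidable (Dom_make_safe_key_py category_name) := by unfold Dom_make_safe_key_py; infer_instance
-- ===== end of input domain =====

-- B does A's job in one pass: each character is classified once ('&'→"and", separators→'_',
-- alphanumerics/underscore kept, everything else dropped) instead of A's five staged .replace
-- scans followed by a filtering join.

-- ===== PORT A =====
def make_safe_key_py (category_name : String) : String :=
  if category_name.toList.isEmpty then "unknown"
  else
    let k0 := PySem.Str.strip (PySem.Str.lower category_name)
    let k1 := PySem.Str.replace k0 " " "_"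
    let k2 := PySem.Str.replace k1 "-" "_"
    let k3 := PySem.Str.replace k2 "&" "and"
    let k4 := PySem.Str.replace k3 "/" "_"
    let k5 := PySem.Str.replace k4 "\\" "_"
    let k6 := String.ofList (k5.toList.filter (fun c => PySem.Chars.isalnum c || c == '_'))
    if k6.toList.isEmpty then "unknown" else k6

-- ===== PORT B =====
def make_safe_key_py_alt (category_name : String) : String :=
  if category_name.toList.isEmpty then "unknown"
  else
    let cs := PySem.Chars.strip (PySem.Chars.lower category_name.toList)
    let out := cs.foldl (fun acc c =>
      if c = '&' then acc ++ ['a', 'n', 'd']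
      else if c = ' ' ∨ c = '-' ∨ c = '/' ∨ c = '\\' then acc ++ ['_']
      else if PySem.Chars.isalnum c || c == '_' then acc ++ [c]
      else acc) []
    if out.isEmpty then "unknown" else String.ofList out

-- ===== PRECONDITION & SPEC =====
def Spec_make_safe_key_py (category_name : String) (out : String) : Prop := out = make_safe_key_py_alt category_name
instance (category_name : String) (out : String) : Decidable (Spec_make_safe_key_py category_name out) := by unfold Spec_make_safe_key_py; infer_instance

-- ===== CLAIM (what is proved, stated in full; the proofs are below) =====
def Claim_equal_make_safe_key_py : Prop := ∀ (category_name : String), Dom_make_safe_key_py category_name → Spec_make_safe_key_py category_name (make_safe_key_py category_name)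

-- ===== LEMMAS AND PROOFS =====

-- B's per-character classification
def pvBChar (c : Char) : List Char :=
  if c = '&' then ['a', 'n', 'd']
  else if c = ' ' ∨ c = '-' ∨ c = '/' ∨ c = '\\' then ['_']
  else if PySem.Chars.isalnum c || c == '_' then [c]
  else []

-- one stage of A: what replace(·, [x], r) does to a single character
def pvR (x : Char) (r : List Char) (c : Char) : List Char := if c = x then r else [c]

-- str.replace with a single-character pattern is a per-character flatMap
theorem pv_go_single (x : Char) (r : List Char) :
    ∀ (fuel : Nat) (l acc : List Char), l.length ≤ fuel →
      PySem.Chars.replace.go [x] r fuel l acc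
        = acc.reverse ++ l.flatMap (pvR x r) := by
  intro fuel
  induction fuel with
  | zero =>
    intro l acc h
    have hl : l = [] := List.eq_nil_of_length_eq_zero (Nat.le_zero.mp h)
    subst hl
    simp [PySem.Chars.replace.go]
  | succ n ih =>
    intro l acc h
    cases l with
    | nil => simp [PySem.Chars.replace.go]
    | cons c t =>
      simp only [PySem.Chars.replace.go, List.isPrefixOf, Bool.and_true]
      by_cases hc : c = x
      · subst hc
        simp only [beq_self_eq_true, if_pos]
        rw [show List.drop [c].length (c :: t) = t from rfl,
          ih t (r.reverse ++ acc) (by simpa using Nat.le_of_succ_le_succ h)]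
        simp [pvR]
      · have hbeq : (x == c) = false := by
          simp only [beq_eq_false_iff_ne]; intro hxc; exact hc hxc.symm
        rw [hbeq]
        simp only [Bool.false_eq_true, if_false]
        rw [ih t (c :: acc) (by simpa using Nat.le_of_succ_le_succ h)]
        simp [pvR, hc]

theorem pv_replace_single (t : List Char) (x : Char) (r : List Char) :
    PySem.Chars.replace t [x] r = t.flatMap (pvR x r) := by
  rw [show PySem.Chars.replace t [x] r = PySem.Chars.replace.go [x] r t.length t [] from rfl]
  rw [pv_go_single x r t.length t [] (le_refl _)]
  simp

-- the five staged per-character maps plus the filtering join equal one flatMap of pvBChar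
theorem pv_stages_eq (t : List Char) :
    (((((t.flatMap (pvR ' ' ['_'])).flatMap (pvR '-' ['_'])).flatMap
        (pvR '&' ['a','n','d'])).flatMap (pvR '/' ['_'])).flatMap
        (pvR '\\' ['_'])).filter (fun c => PySem.Chars.isalnum c || c == '_')
      = t.flatMap pvBChar := by
  induction t with
  | nil => simp
  | cons c t ih =>
    simp only [List.flatMap_cons, List.flatMap_append, List.filter_append, ih]
    congr 1
    by_cases h1 : c = ' '
    · subst h1; decide
    by_cases h2 : c = '-'
    · subst h2; decide
    by_cases h3 : c = '&'
    · subst h3; decide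
    by_cases h4 : c = '/'
    · subst h4; decide
    by_cases h5 : c = '\\'
    · subst h5; decide
    simp only [pvR, pvBChar, h1, h2, h3, h4, h5, if_false, or_self,
      List.flatMap_cons, List.flatMap_nil, List.append_nil]
    by_cases hp : (PySem.Chars.isalnum c || c == '_') = true
    · simp [hp]
    · simp [hp]

-- B's conditional-append loop is the flatMap of pvBChar
theorem pv_fold_eq (t : List Char) :
    t.foldl (fun acc c =>
      if c = '&' then acc ++ ['a', 'n', 'd']
      else if c = ' ' ∨ c = '-' ∨ c = '/' ∨ c = '\\' then acc ++ ['_']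
      else if PySem.Chars.isalnum c || c == '_' then acc ++ [c]
      else acc) [] = t.flatMap pvBChar := by
  have hstep : (fun (acc : List Char) (c : Char) =>
      if c = '&' then acc ++ ['a', 'n', 'd']
      else if c = ' ' ∨ c = '-' ∨ c = '/' ∨ c = '\\' then acc ++ ['_']
      else if PySem.Chars.isalnum c || c == '_' then acc ++ [c]
      else acc) = fun acc c => acc ++ pvBChar c := by
    funext acc c
    unfold pvBChar
    split_ifs <;> simp
  rw [hstep, PySem.List.foldl_append_eq_flatMap]
  simp

-- ===== VERDICT (by name: the statement is the Claim_ definition above) =====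
theorem make_safe_key_py_spec : Claim_equal_make_safe_key_py := by
  intro s _
  unfold Spec_make_safe_key_py make_safe_key_py make_safe_key_py_alt
  by_cases h0 : s.toList.isEmpty
  · simp [h0]
  · simp only [h0, Bool.false_eq_true, if_false]
    rw [pv_fold_eq]
    have hA :
        (PySem.Str.replace (PySem.Str.replace (PySem.Str.replace (PySem.Str.replace
          (PySem.Str.replace (PySem.Str.strip (PySem.Str.lower s)) " " "_") "-" "_")
          "&" "and") "/" "_") "\\" "_").toList.filter
          (fun c => PySem.Chars.isalnum c || c == '_')
        = (PySem.Chars.strip (PySem.Chars.lower s.toList)).flatMap pvBChar := by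
      have e1 : (" " : String).toList = [' '] := rfl
      have e2 : ("-" : String).toList = ['-'] := rfl
      have e3 : ("&" : String).toList = ['&'] := rfl
      have e4 : ("/" : String).toList = ['/'] := rfl
      have e5 : ("\\" : String).toList = ['\\'] := rfl
      have e6 : ("_" : String).toList = ['_'] := rfl
      have e7 : ("and" : String).toList = ['a', 'n', 'd'] := rfl
      simp only [PySem.Str.toList_replace, PySem.Str.toList_strip, PySem.Str.toList_lower,
        e1, e2, e3, e4, e5, e6, e7, pv_replace_single]
      exact pv_stages_eq _
    rw [hA]
    by_cases he : ((PySem.Chars.strip (PySem.Chars.lower s.toList)).flatMap pvBChar).isEmpty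
    · simp [he]
    · simp [he]
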